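-- pv_equiv track=rewrite | github.com/sayarghoshroy/Summaformers | LaySumm_Generation/Utilities/make_Submission.py | get_tops
-- ===== SOURCE A (Python) =====
-- def get_tops(units):
--     text = ""
--     count = 0
--     word_count = 0
--
--     for sent in units:
--         if sent == 'PARAGRAPH':
--             continue
--
--         text += sent + "\n\n"
--         count += 1
--         word_count += len(sent.split(" "))
--         if word_count > 150:
--         	break
--
--     return text
-- ===== SOURCE B (Python) =====
-- def get_tops(units):
--     sents = [s for s in units if s != 'PARAGRAPH']
--     counts = [len(s.split(' ')) for s in sents]
--     take = len(sents)
--     total = 0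
--     for i, c in enumerate(counts):
--         total += c
--         if total > 150:
--             take = i + 1
--             break
--     return ''.join(s + '\n\n' for s in sents[:take])
-- ===== Notes on version B (the rewrite author's own statement) =====
-- stated objective: alternative
-- what changed: B replaces A's single stateful loop with break by a pipeline: filter out 'PARAGRAPH', map to per-sentence word counts, scan the counts once to find how many sentences to take, then join that prefix.
import Mathlib
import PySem

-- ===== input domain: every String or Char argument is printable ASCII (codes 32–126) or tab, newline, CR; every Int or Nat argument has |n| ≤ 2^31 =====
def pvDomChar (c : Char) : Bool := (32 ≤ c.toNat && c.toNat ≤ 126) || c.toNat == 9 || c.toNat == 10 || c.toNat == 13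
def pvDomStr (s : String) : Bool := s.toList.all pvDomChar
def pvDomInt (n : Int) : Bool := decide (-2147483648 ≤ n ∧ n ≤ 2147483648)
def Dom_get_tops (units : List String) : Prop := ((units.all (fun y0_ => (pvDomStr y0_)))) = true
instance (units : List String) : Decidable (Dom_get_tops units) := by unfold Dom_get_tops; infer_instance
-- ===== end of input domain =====

-- B rewrites A's single stateful loop-with-break as a filter/map/scan/join pipeline (objective: alternative decomposition).

-- len(s.split(' ')), used by both Pythons (sep " " is nonempty, so Chars.splitOn is exact)
def get_tops_wcount (s : String) : Int := ((PySem.Chars.splitOn s.toList [' ']).length : Int)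

-- ===== PORT A =====
-- literal port of A's for-loop with continue/break, carrying (text, count, word_count)
def get_tops_go (units : List String) (text : String) (count : Int) (wc : Int) : String :=
  match units with
  | [] => text
  | sent :: rest =>
    if sent == "PARAGRAPH" then get_tops_go rest text count wc
    else
      let text' := text ++ sent ++ "\n\n"
      let count' := count + 1
      let wc' := wc + get_tops_wcount sent
      if wc' > 150 then text' else get_tops_go rest text' count' wc'

def get_tops (units : List String) : String := get_tops_go units "" 0 0

-- ===== PORT B =====
-- the scan of Source B's enumerate loop: first index whose running total exceeds 150, +1; else dflt
def get_tops_findTake (counts : List Int) (total : Int) (i : Nat) (dflt : Nat) : Nat :=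
  match counts with
  | [] => dflt
  | c :: rest =>
    if total + c > 150 then i + 1 else get_tops_findTake rest (total + c) (i + 1) dflt

def get_tops_alt (units : List String) : String :=
  let sents := units.filter (fun s => s != "PARAGRAPH")
  let counts := sents.map get_tops_wcount
  let take := get_tops_findTake counts 0 0 sents.length
  String.join ((sents.take take).map (fun s => s ++ "\n\n"))

-- ===== PRECONDITION & SPEC =====
def Spec_get_tops (units : List String) (out : String) : Prop := out = get_tops_alt units
instance (units : List String) (out : String) : Decidable (Spec_get_tops units out) := by unfold Spec_get_tops; infer_instance

-- ===== CLAIM (what is proved, stated in full; the proofs are below) =====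
def Claim_equal_get_tops : Prop := ∀ (units : List String), Dom_get_tops units → Spec_get_tops units (get_tops units)

-- ===== LEMMAS AND PROOFS =====

theorem foldl_append_str (l : List String) :
    ∀ a : String, l.foldl (· ++ ·) a = a ++ l.foldl (· ++ ·) "" := by
  induction l with
  | nil => intro a; simp
  | cons y ys ih =>
    intro a
    simp only [List.foldl_cons]
    rw [ih (a ++ y), ih ("" ++ y)]
    simp [String.append_assoc]

theorem join_cons (x : String) (l : List String) :
    String.join (x :: l) = x ++ String.join l := by
  simp only [String.join, List.foldl_cons]
  rw [foldl_append_str l ("" ++ x)]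
  simp

theorem findTake_shift (counts : List Int) (total : Int) (i : Nat) (dflt : Nat) :
    get_tops_findTake counts total (i + 1) (dflt + 1) =
      get_tops_findTake counts total i dflt + 1 := by
  induction counts generalizing total i with
  | nil => simp [get_tops_findTake]
  | cons c rest ih =>
    simp only [get_tops_findTake]
    split_ifs with h
    · rfl
    · exact ih (total + c) (i + 1)

theorem get_tops_go_eq (units : List String) :
    ∀ (text : String) (count : Int) (wc : Int),
      get_tops_go units text count wc =
        text ++
          (let sents := units.filter (fun s => s != "PARAGRAPH")
           let counts := sents.map get_tops_wcount
           String.join ((sents.take (get_tops_findTake counts wc 0 sents.length)).map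
            (fun s => s ++ "\n\n"))) := by
  induction units with
  | nil => intro text count wc; simp [get_tops_go, String.join]
  | cons sent rest ih =>
    intro text count wc
    by_cases hp : sent == "PARAGRAPH"
    · have he : sent = "PARAGRAPH" := by simpa using hp
      subst he
      simp only [get_tops_go, List.filter_cons, if_pos, BEq.rfl, bne_self_eq_false,
        Bool.false_eq_true]
      exact ih text count wc
    · have hp' : (sent != "PARAGRAPH") = true := by simp_all
      simp only [get_tops_go, hp, Bool.false_eq_true, if_false, List.filter_cons, hp',
        if_pos, List.map_cons, List.length_cons, get_tops_findTake]
      by_cases hb : wc + get_tops_wcount sent > 150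
      · rw [if_pos hb, if_pos hb]
        simp [String.join, String.append_assoc]
      · rw [if_neg hb, if_neg hb, findTake_shift, List.take_succ_cons, List.map_cons,
          join_cons, ih]
        simp [String.append_assoc]

-- ===== VERDICT (by name: the statement is the Claim_ definition above) =====
theorem get_tops_spec : Claim_equal_get_tops := by
  intro units _
  unfold Spec_get_tops get_tops get_tops_alt
  rw [get_tops_go_eq]
  simp
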